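-- pv_equiv track=rewrite | github.com/grassking100/deep_gene_annotator | sequence_annotation/preprocess/path_decode.py | _get_safe_sites
-- ===== SOURCE A (Python) =====
-- def _get_safe_sites(sites,alt_sites=None,dist=None):
--     dist = dist or 32
--     valid_sites = set()
--     sites = sorted(list(sites))
--     valid_sites = set()
--     for index in range(len(sites)):
--         is_valid = True
--         current_site = sites[index]
--         if index < len(sites)-1:
--             next_site = sites[index+1]
--             if abs(current_site-next_site) <= dist:
--                 is_valid = False
--         if index > 0:
--             previous_site = sites[index-1]
--             if abs(current_site-previous_site) <= dist:
--                 is_valid = False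
--         if is_valid:
--             valid_sites.add(current_site)
--     if alt_sites:
--         valid_sites -= alt_sites
--     return valid_sites
-- ===== SOURCE B (Python) =====
-- def _get_safe_sites(sites, alt_sites=None, dist=None):
--     dist = dist or 32
--     srt = sorted(sites)
--     n = len(srt)
--     valid_sites = {srt[i] for i in range(n)
--                    if all(j == i or abs(srt[i] - srt[j]) > dist for j in range(n))}
--     if alt_sites:
--         valid_sites -= set(alt_sites)
--     return valid_sites
-- ===== Notes on version B (the rewrite author's own statement) =====
-- stated objective: simpler
-- what changed: Replaces A's stateful single pass over the sorted list (is_valid flag with separate previous/next neighbour checks) by a direct set comprehension: a site is safe iff every other index holds a site farther than dist (all-pairs check), then the same dist-default and alt_sites subtraction.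
import Mathlib
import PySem

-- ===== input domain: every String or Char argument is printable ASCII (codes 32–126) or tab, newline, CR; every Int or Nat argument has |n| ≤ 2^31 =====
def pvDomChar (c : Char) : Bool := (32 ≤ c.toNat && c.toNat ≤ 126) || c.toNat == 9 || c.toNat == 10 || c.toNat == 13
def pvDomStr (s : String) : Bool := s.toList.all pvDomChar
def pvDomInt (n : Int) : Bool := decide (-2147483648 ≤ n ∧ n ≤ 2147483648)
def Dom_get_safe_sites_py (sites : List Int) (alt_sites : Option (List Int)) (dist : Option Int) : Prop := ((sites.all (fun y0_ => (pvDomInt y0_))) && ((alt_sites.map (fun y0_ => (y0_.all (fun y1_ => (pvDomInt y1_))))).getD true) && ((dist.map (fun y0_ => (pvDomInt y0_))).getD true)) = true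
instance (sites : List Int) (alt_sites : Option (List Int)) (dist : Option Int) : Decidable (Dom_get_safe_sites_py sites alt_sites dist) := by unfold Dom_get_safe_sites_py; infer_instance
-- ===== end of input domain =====

-- B replaces A's stateful sorted-neighbour single pass by an all-pairs comprehension (a site is safe
-- iff every other index is farther than dist); simpler, not faster.


-- ===== PORT A =====
-- dist = dist or 32 (both programs start with this line)
def pvDist (dist : Option Int) : Int :=
  match dist with
  | none => 32
  | some v => if v = 0 then 32 else v

-- the is_valid flag computed by A's loop body at position index
def pvCondA (s : List Int) (d : Int) (index : Int) : Bool :=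
  let current := PySem.List.pyGetD s index 0
  let is_valid := true
  let is_valid :=
    if index < (s.length : Int) - 1 then
      (if |current - PySem.List.pyGetD s (index + 1) 0| ≤ d then false else is_valid)
    else is_valid
  let is_valid :=
    if 0 < index then
      (if |current - PySem.List.pyGetD s (index - 1) 0| ≤ d then false else is_valid)
    else is_valid
  is_valid

def get_safe_sites_py (sites : List Int) (alt_sites : Option (List Int)) (dist : Option Int) : List Int :=
  let d := pvDist dist
  -- sites = sorted(list(sites))
  let s := PySem.List.sorted sites (fun x => x) false
  -- for index in range(len(sites)): … if is_valid: valid_sites.add(current_site)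
  let valid : PySem.Set Int :=
    (PySem.List.pyRange 0 (s.length : Int) 1).foldl
      (fun acc index =>
        if pvCondA s d index then PySem.Set.add acc (PySem.List.pyGetD s index 0) else acc)
      PySem.Set.empty
  -- if alt_sites: valid_sites -= alt_sites
  match alt_sites with
  | none => valid
  | some alts => if alts.isEmpty then valid else PySem.Set.diff valid alts

-- ===== PORT B =====
-- all(j == i or abs(srt[i] - srt[j]) > dist for j in range(n))
def pvCondB (s : List Int) (d : Int) (i : Int) : Bool :=
  (PySem.List.pyRange 0 (s.length : Int) 1).all
    (fun j => j == i || d < |PySem.List.pyGetD s i 0 - PySem.List.pyGetD s j 0|)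

def get_safe_sites_py_alt (sites : List Int) (alt_sites : Option (List Int)) (dist : Option Int) : List Int :=
  let d := pvDist dist
  let srt := PySem.List.sorted sites (fun x => x) false
  -- {srt[i] for i in range(n) if all(j == i or abs(srt[i]-srt[j]) > dist for j in range(n))}
  let valid : PySem.Set Int :=
    PySem.Set.ofList
      (((PySem.List.pyRange 0 (srt.length : Int) 1).filter (pvCondB srt d)).map
        (fun i => PySem.List.pyGetD srt i 0))
  -- if alt_sites: valid_sites -= set(alt_sites)
  match alt_sites with
  | none => valid
  | some alts => if alts.isEmpty then valid else PySem.Set.diff valid alts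

-- ===== PRECONDITION & SPEC =====
def Spec_get_safe_sites_py (sites : List Int) (alt_sites : Option (List Int)) (dist : Option Int) (out : List Int) : Prop := out = get_safe_sites_py_alt sites alt_sites dist
instance (sites : List Int) (alt_sites : Option (List Int)) (dist : Option Int) (out : List Int) : Decidable (Spec_get_safe_sites_py sites alt_sites dist out) := by unfold Spec_get_safe_sites_py; infer_instance

-- ===== CLAIM (what is proved, stated in full; the proofs are below) =====
def Claim_equal_get_safe_sites_py : Prop := ∀ (sites : List Int) (alt_sites : Option (List Int)) (dist : Option Int), Dom_get_safe_sites_py sites alt_sites dist → Spec_get_safe_sites_py sites alt_sites dist (get_safe_sites_py sites alt_sites dist)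

-- ===== LEMMAS AND PROOFS =====

-- On a list monotone in its indices, the two neighbour checks are equivalent to the all-pairs check.
lemma pv_cond_iff (s : List Int) (d : Int)
    (hmono : ∀ p q : Int, 0 ≤ p → p ≤ q → q < (s.length : Int) →
      PySem.List.pyGetD s p 0 ≤ PySem.List.pyGetD s q 0)
    (i : Int) (h0 : 0 ≤ i) (hn : i < (s.length : Int)) :
    ((i < (s.length : Int) - 1 → d < |PySem.List.pyGetD s i 0 - PySem.List.pyGetD s (i + 1) 0|) ∧
     (0 < i → d < |PySem.List.pyGetD s i 0 - PySem.List.pyGetD s (i - 1) 0|))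
    ↔ (∀ j : Int, 0 ≤ j → j < (s.length : Int) → j ≠ i →
        d < |PySem.List.pyGetD s i 0 - PySem.List.pyGetD s j 0|) := by
  constructor
  · rintro ⟨h1, h2⟩ j hj0 hjn hne
    rcases lt_or_gt_of_ne hne with hlt | hgt
    · have hA := h2 (by omega)
      have m1 : PySem.List.pyGetD s j 0 ≤ PySem.List.pyGetD s (i - 1) 0 :=
        hmono j (i - 1) hj0 (by omega) (by omega)
      have m2 : PySem.List.pyGetD s (i - 1) 0 ≤ PySem.List.pyGetD s i 0 :=
        hmono (i - 1) i (by omega) (by omega) hn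
      rw [abs_of_nonneg (by omega)] at hA ⊢
      omega
    · have hA := h1 (by omega)
      have m1 : PySem.List.pyGetD s i 0 ≤ PySem.List.pyGetD s (i + 1) 0 :=
        hmono i (i + 1) h0 (by omega) (by omega)
      have m2 : PySem.List.pyGetD s (i + 1) 0 ≤ PySem.List.pyGetD s j 0 :=
        hmono (i + 1) j (by omega) (by omega) hjn
      rw [abs_of_nonpos (by omega)] at hA ⊢
      omega
  · intro h
    refine ⟨fun h1 => h (i + 1) (by omega) (by omega) (by omega),
            fun h2 => h (i - 1) (by omega) (by omega) (by omega)⟩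

-- pvCondA in propositional form
lemma pv_condA_iff (s : List Int) (d : Int) (i : Int) :
    pvCondA s d i = true ↔
      ((i < (s.length : Int) - 1 → d < |PySem.List.pyGetD s i 0 - PySem.List.pyGetD s (i + 1) 0|) ∧
       (0 < i → d < |PySem.List.pyGetD s i 0 - PySem.List.pyGetD s (i - 1) 0|)) := by
  unfold pvCondA
  split_ifs with h1 h2 h3 <;> simp_all <;> try omega

-- pvCondB in propositional form
lemma pv_condB_iff (s : List Int) (d : Int) (i : Int) :
    pvCondB s d i = true ↔
      (∀ j : Int, 0 ≤ j → j < (s.length : Int) → j ≠ i →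
        d < |PySem.List.pyGetD s i 0 - PySem.List.pyGetD s j 0|) := by
  unfold pvCondB
  simp only [List.all_eq_true, PySem.List.mem_pyRange_one, Bool.or_eq_true, beq_iff_eq,
    decide_eq_true_eq]
  constructor
  · intro h j hj0 hjn hne
    rcases h j ⟨hj0, hjn⟩ with h' | h'
    · exact absurd h' hne
    · exact h'
  · rintro h j ⟨hj0, hjn⟩
    by_cases hji : j = i
    · exact Or.inl hji
    · exact Or.inr (h j hj0 hjn hji)

-- the sorted list is monotone in its indices (stated through pyGetD)
lemma pv_sorted_mono (sites : List Int) :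
    ∀ p q : Int, 0 ≤ p → p ≤ q →
      q < ((PySem.List.sorted sites (fun x => x) false).length : Int) →
      PySem.List.pyGetD (PySem.List.sorted sites (fun x => x) false) p 0 ≤
      PySem.List.pyGetD (PySem.List.sorted sites (fun x => x) false) q 0 := by
  intro p q hp hpq hq
  rw [PySem.List.pyGetD_eq_getElem _ 0 hp (by omega),
      PySem.List.pyGetD_eq_getElem _ 0 (by omega) hq]
  exact PySem.List.sorted_id_getElem_mono sites (by omega) (by omega)

-- the two valid-set computations coincide on the sorted list
lemma pv_valid_eq (sites : List Int) (d : Int) :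
    ((PySem.List.pyRange 0 ((PySem.List.sorted sites (fun x => x) false).length : Int) 1).foldl
      (fun acc index =>
        if pvCondA (PySem.List.sorted sites (fun x => x) false) d index then
          PySem.Set.add acc (PySem.List.pyGetD (PySem.List.sorted sites (fun x => x) false) index 0)
        else acc)
      PySem.Set.empty)
    = PySem.Set.ofList
        (((PySem.List.pyRange 0 ((PySem.List.sorted sites (fun x => x) false).length : Int) 1).filter
            (pvCondB (PySem.List.sorted sites (fun x => x) false) d)).map
          (fun i => PySem.List.pyGetD (PySem.List.sorted sites (fun x => x) false) i 0)) := by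
  set s := PySem.List.sorted sites (fun x => x) false with hs
  rw [PySem.List.foldl_if_eq_foldl_filter (p := pvCondA s d)
        (f := fun acc i => PySem.Set.add acc (PySem.List.pyGetD s i 0))]
  rw [PySem.Set.ofList_eq_foldl, List.foldl_map]
  have hfil : (PySem.List.pyRange 0 (s.length : Int) 1).filter (pvCondA s d)
      = (PySem.List.pyRange 0 (s.length : Int) 1).filter (pvCondB s d) := by
    apply List.filter_congr
    intro i hi
    rw [PySem.List.mem_pyRange_one] at hi
    have h1 := pv_condA_iff s d i
    have h2 := pv_condB_iff s d i
    have h3 := pv_cond_iff s d (by rw [hs]; exact pv_sorted_mono sites) i hi.1 hi.2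
    cases hca : pvCondA s d i <;> cases hcb : pvCondB s d i <;> simp_all
  rw [hfil]
  rfl

-- ===== VERDICT (by name: the statement is the Claim_ definition above) =====
theorem get_safe_sites_py_spec : Claim_equal_get_safe_sites_py := by
  intro sites alt_sites dist _hdom
  unfold Spec_get_safe_sites_py
  have h := pv_valid_eq sites (pvDist dist)
  cases alt_sites with
  | none => simp only [get_safe_sites_py, get_safe_sites_py_alt]; exact h
  | some alts => simp only [get_safe_sites_py, get_safe_sites_py_alt]; rw [h]
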